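-- pv_equiv track=rewrite | github.com/pypi-data/pypi-mirror-399 | packages/pctheory/pctheory-0.0.43.tar.gz/pctheory-0.0.43/src/pctheory/util.py | norgard
-- ===== SOURCE A (Python) =====
-- def norgard(n: int) -> list:
--     """
--     Generates the first n numbers of OEIS A004718 (Per Nørgård's infinity series)
--     :param n: The number of terms to compute
--     :return: The series
--     """
--     n_list = [0 for i in range(n)]
--     i = 0
--     m = 0
--     while m < n:
--         m = 2 * i
--         if m < n:
--             n_list[m] = -n_list[i]
--         m += 1
--         if m < n:
--             n_list[m] = n_list[i] + 1
--         i += 1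
--     return n_list
-- ===== SOURCE B (Python) =====
-- def norgard(n: int) -> list:
--     """
--     Generates the first n numbers of OEIS A004718 (Per Norgard's infinity series)
--     by computing each term independently from the binary expansion of its index.
--     """
--     out = []
--     for j in range(n):
--         bits = []
--         k = j
--         while k > 0:
--             bits.append(k & 1)
--             k >>= 1
--         v = 0
--         for b in reversed(bits):
--             v = v + 1 if b else -v
--         out.append(v)
--     return out
-- ===== Notes on version B (the rewrite author's own statement) =====
-- stated objective: alternative
-- what changed: Replaces A's forward recurrence that fills an array in place (each term read from an earlier slot) with an independent per-index computation: each term is a fold over the index's binary digits MSB-to-LSB (+1 on a 1-bit, negate on a 0-bit).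
import Mathlib
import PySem

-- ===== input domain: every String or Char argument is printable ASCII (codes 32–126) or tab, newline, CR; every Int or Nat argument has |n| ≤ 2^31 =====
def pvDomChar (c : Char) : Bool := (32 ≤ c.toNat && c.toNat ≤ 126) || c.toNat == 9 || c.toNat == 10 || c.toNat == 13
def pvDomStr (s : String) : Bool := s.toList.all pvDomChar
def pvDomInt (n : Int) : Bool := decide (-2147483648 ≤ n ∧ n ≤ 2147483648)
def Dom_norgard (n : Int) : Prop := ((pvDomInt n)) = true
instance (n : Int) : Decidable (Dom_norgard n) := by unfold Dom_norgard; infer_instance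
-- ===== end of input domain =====

-- B recomputes each term independently from the binary expansion of its index
-- instead of A's in-place array recurrence (objective: alternative decomposition).

-- ===== PORT A =====
-- A's while loop; fuel bounds the iteration count (n.toNat + 1 always suffices), a totality guard only
def norgardLoop (n : Int) : Nat → List Int → Int → Int → List Int
  | 0, l, _, _ => l
  | fuel+1, l, i, m =>
    if m < n then
      let l1 := if 2 * i < n then l.set (2 * i).toNat (-(l.getD i.toNat 0)) else l
      let l2 := if 2 * i + 1 < n then l1.set (2 * i + 1).toNat ((l1.getD i.toNat 0) + 1) else l1
      norgardLoop n fuel l2 (i + 1) (2 * i + 1)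
    else l

def norgard (n : Int) : List Int :=
  norgardLoop n (n.toNat + 1) (List.replicate n.toNat 0) 0 0

-- ===== PORT B =====
-- bits of k, least-significant first (B's inner while loop)
def pvBitsLSB : Nat → List Nat
  | 0 => []
  | k+1 => ((k+1) % 2) :: pvBitsLSB ((k+1) / 2)

-- fold over the bits most-significant first (B's `for b in reversed(bits)` loop)
def pvTerm (j : Nat) : Int :=
  (pvBitsLSB j).reverse.foldl (fun v b => if b = 1 then v + 1 else -v) 0

def norgard_alt (n : Int) : List Int :=
  (PySem.List.pyRange 0 n 1).map (fun j => pvTerm j.toNat)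

-- ===== PRECONDITION & SPEC =====
def Spec_norgard (n : Int) (out : List Int) : Prop := out = norgard_alt n
instance (n : Int) (out : List Int) : Decidable (Spec_norgard n out) := by unfold Spec_norgard; infer_instance

-- ===== CLAIM (what is proved, stated in full; the proofs are below) =====
def Claim_equal_norgard : Prop := ∀ (n : Int), Dom_norgard n → Spec_norgard n (norgard n)

-- ===== LEMMAS AND PROOFS =====

theorem pvGetD_set (l : List Int) (a : Nat) (v : Int) (j : Nat) (hj : j < l.length) :
    (l.set a v).getD j 0 = if j = a then v else l.getD j 0 := by
  by_cases h : j = a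
  · subst h
    rw [if_pos rfl, List.getD_eq_getElem?_getD, List.getElem?_set_eq_of_lt v hj]
    rfl
  · rw [if_neg h, List.getD_eq_getElem?_getD, List.getElem?_set_ne (fun hh => h hh.symm),
      List.getD_eq_getElem?_getD]

theorem pvGetD_replicate (N j : Nat) : (List.replicate N (0 : Int)).getD j 0 = 0 := by
  rw [List.getD_eq_getElem?_getD, List.getElem?_replicate]
  split <;> rfl

theorem pvTerm_zero : pvTerm 0 = 0 := by
  simp [pvTerm, pvBitsLSB]

theorem pvBitsLSB_pos (k : Nat) (hk : 0 < k) :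
    pvBitsLSB k = (k % 2) :: pvBitsLSB (k / 2) := by
  cases k with
  | zero => omega
  | succ k => rw [pvBitsLSB]

theorem pvTerm_even (k : Nat) : pvTerm (2 * k) = -(pvTerm k) := by
  rcases Nat.eq_zero_or_pos k with h | h
  · subst h; norm_num [pvTerm_zero]
  · have h1 : 2 * k % 2 = 0 := by omega
    have h2 : 2 * k / 2 = k := by omega
    have hb : pvBitsLSB (2 * k) = 0 :: pvBitsLSB k := by
      rw [pvBitsLSB_pos (2 * k) (by omega), h1, h2]
    unfold pvTerm
    rw [hb, List.reverse_cons, List.foldl_append]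
    simp

theorem pvTerm_odd (k : Nat) : pvTerm (2 * k + 1) = pvTerm k + 1 := by
  have h1 : (2 * k + 1) % 2 = 1 := by omega
  have h2 : (2 * k + 1) / 2 = k := by omega
  have hb : pvBitsLSB (2 * k + 1) = 1 :: pvBitsLSB k := by
    rw [pvBitsLSB_pos (2 * k + 1) (by omega), h1, h2]
  unfold pvTerm
  rw [hb, List.reverse_cons, List.foldl_append]
  simp

theorem pvTerm_one : pvTerm 1 = 1 := by
  have h := pvTerm_odd 0
  norm_num [pvTerm_zero] at h
  exact h

theorem norgardLoop_step (n : Int) (fuel : Nat) (l : List Int) (i m : Int) (h : m < n)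
    (l1 l2 : List Int)
    (h1 : l1 = if 2 * i < n then l.set (2 * i).toNat (-(l.getD i.toNat 0)) else l)
    (h2 : l2 = if 2 * i + 1 < n then l1.set (2 * i + 1).toNat ((l1.getD i.toNat 0) + 1) else l1) :
    norgardLoop n (fuel + 1) l i m = norgardLoop n fuel l2 (i + 1) (2 * i + 1) := by
  subst h1 h2
  show (if m < n then _ else l) = _
  rw [if_pos h]

theorem norgardLoop_exit (n : Int) (fuel : Nat) (l : List Int) (i m : Int) (h : ¬ m < n) :
    norgardLoop n (fuel + 1) l i m = l := by
  show (if m < n then _ else l) = l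
  rw [if_neg h]

theorem norgardLoop_inv (n : Int) (hn : 0 < n) :
    ∀ (fuel : Nat) (i : Int) (l : List Int), 1 ≤ i →
    l.length = n.toNat →
    (∀ j : Nat, j < n.toNat → (j : Int) ≤ 2 * i - 1 → l.getD j 0 = pvTerm j) →
    n ≤ 2 * (i + (fuel : Int)) - 1 →
    (norgardLoop n fuel l i (2 * i - 1)).length = n.toNat ∧
    (∀ j : Nat, j < n.toNat → (norgardLoop n fuel l i (2 * i - 1)).getD j 0 = pvTerm j) := by
  intro fuel
  induction fuel with
  | zero =>
    intro i l _ hlen hinv hfuel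
    exact ⟨hlen, fun j hj => hinv j hj (by simp at hfuel; omega)⟩
  | succ fuel ih =>
    intro i l hi hlen hinv hfuel
    by_cases hm : 2 * i - 1 < n
    · have hiread : l.getD i.toNat 0 = pvTerm i.toNat := hinv i.toNat (by omega) (by omega)
      set l1 := if 2 * i < n then l.set (2 * i).toNat (-(l.getD i.toNat 0)) else l with hl1
      set l2 := if 2 * i + 1 < n then l1.set (2 * i + 1).toNat ((l1.getD i.toNat 0) + 1) else l1 with hl2
      rw [norgardLoop_step n fuel l i _ hm l1 l2 hl1 hl2]
      have hlen1 : l1.length = n.toNat := by rw [hl1]; split <;> simp [hlen]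
      have hlen2 : l2.length = n.toNat := by rw [hl2]; split <;> simp [hlen1]
      have hget1 : ∀ j : Nat, j < n.toNat →
          l1.getD j 0 = if (j : Int) = 2 * i then -(pvTerm i.toNat) else l.getD j 0 := by
        intro j hj
        rw [hl1]
        by_cases hje : (j : Int) = 2 * i
        · rw [if_pos (show 2 * i < n by omega), if_pos hje,
            pvGetD_set l _ _ j (by omega), if_pos (show j = (2 * i).toNat by omega), hiread]
        · rw [if_neg hje]
          split
          · rw [pvGetD_set l _ _ j (by omega), if_neg (by omega)]
          · rfl
      have hget1i : l1.getD i.toNat 0 = pvTerm i.toNat := by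
        rw [hget1 i.toNat (by omega), if_neg (by omega), hiread]
      have hget2 : ∀ j : Nat, j < n.toNat → (j : Int) ≤ 2 * (i + 1) - 1 →
          l2.getD j 0 = pvTerm j := by
        intro j hj hjle
        rw [hl2]
        by_cases hjo : (j : Int) = 2 * i + 1
        · rw [if_pos (show 2 * i + 1 < n by omega),
            pvGetD_set l1 _ _ j (by omega), if_pos (show j = (2 * i + 1).toNat by omega), hget1i,
            show j = 2 * i.toNat + 1 by omega, pvTerm_odd]
        · have hj' : l1.getD j 0 = pvTerm j := by
            rw [hget1 j hj]
            by_cases hje : (j : Int) = 2 * i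
            · rw [if_pos hje, show j = 2 * i.toNat by omega, pvTerm_even]
            · rw [if_neg hje]
              exact hinv j hj (by omega)
          split
          · rw [pvGetD_set l1 _ _ j (by omega), if_neg (by omega), hj']
          · exact hj'
      have h21 : 2 * i + 1 = 2 * (i + 1) - 1 := by ring
      rw [h21]
      exact ih (i + 1) l2 (by omega) hlen2 hget2 (by push_cast at hfuel ⊢; omega)
    · rw [norgardLoop_exit n fuel l i _ hm]
      exact ⟨hlen, fun j hj => hinv j hj (by omega)⟩

theorem norgard_getD (n : Int) (hn : 0 < n) :
    (norgard n).length = n.toNat ∧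
    (∀ j : Nat, j < n.toNat → (norgard n).getD j 0 = pvTerm j) := by
  unfold norgard
  set l0 := List.replicate n.toNat (0 : Int) with hl0
  have hlen0 : l0.length = n.toNat := by simp [hl0]
  set l1 := if 2 * (0 : Int) < n then l0.set (2 * (0 : Int)).toNat (-(l0.getD (0 : Int).toNat 0)) else l0 with hl1
  set l2 := if 2 * (0 : Int) + 1 < n then l1.set (2 * (0 : Int) + 1).toNat ((l1.getD (0 : Int).toNat 0) + 1) else l1 with hl2
  rw [norgardLoop_step n n.toNat l0 0 0 hn l1 l2 hl1 hl2]
  rw [show (0 : Int) + 1 = 1 by ring, show 2 * (0 : Int) + 1 = 2 * 1 - 1 by ring]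
  have hlen1 : l1.length = n.toNat := by rw [hl1]; split <;> simp [hlen0]
  have hlen2 : l2.length = n.toNat := by rw [hl2]; split <;> simp [hlen1]
  have hget1 : ∀ j : Nat, j < n.toNat → l1.getD j 0 = 0 := by
    intro j hj
    rw [hl1, if_pos (show 2 * (0 : Int) < n by omega)]
    rw [pvGetD_set l0 _ _ j (by omega)]
    by_cases h : j = (2 * (0 : Int)).toNat
    · rw [if_pos h, hl0, pvGetD_replicate]
      norm_num
    · rw [if_neg h, hl0, pvGetD_replicate]
  have hget2 : ∀ j : Nat, j < n.toNat → (j : Int) ≤ 2 * 1 - 1 → l2.getD j 0 = pvTerm j := by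
    intro j hj hjle
    have hj01 : j = 0 ∨ j = 1 := by omega
    rw [hl2]
    split
    · rw [pvGetD_set l1 _ _ j (by omega)]
      rcases hj01 with h | h <;> subst h
      · rw [if_neg (by omega : ¬ (0 : Nat) = (2 * (0 : Int) + 1).toNat), hget1 0 (by omega), pvTerm_zero]
      · rw [if_pos (by omega : (1 : Nat) = (2 * (0 : Int) + 1).toNat),
          show (0 : Int).toNat = 0 from rfl, hget1 0 (by omega), pvTerm_one]
        norm_num
    · rename_i h1n
      have h : j = 0 := by omega
      subst h
      rw [hget1 0 (by omega), pvTerm_zero]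
  exact norgardLoop_inv n hn n.toNat 1 l2 (by omega) hlen2 hget2 (by omega)

theorem norgard_alt_getD (n : Int) :
    (norgard_alt n).length = n.toNat ∧
    (∀ j : Nat, j < n.toNat → (norgard_alt n).getD j 0 = pvTerm j) := by
  unfold norgard_alt
  rw [PySem.List.pyRange_one]
  constructor
  · simp
  · intro j hj
    have hjlt : j < (n - 0).toNat := by omega
    rw [List.getD_eq_getElem?_getD]
    simp only [List.getElem?_map, List.getElem?_range, hjlt]
    simp

-- ===== VERDICT (by name: the statement is the Claim_ definition above) =====
theorem norgard_spec : Claim_equal_norgard := by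
  intro n _
  unfold Spec_norgard
  by_cases hn : n ≤ 0
  case pos =>
    have h1 : norgard n = [] := by
      unfold norgard
      rw [show n.toNat = 0 by omega]
      exact norgardLoop_exit n 0 _ 0 0 (by omega)
    have h2 : norgard_alt n = [] := by
      unfold norgard_alt
      rw [PySem.List.pyRange_one_eq_nil (by omega)]
      rfl
    rw [h1, h2]
  · obtain ⟨hlA, hgA⟩ := norgard_getD n (by omega)
    obtain ⟨hlB, hgB⟩ := norgard_alt_getD n
    apply List.ext_getElem (by omega)
    intro j hj1 hj2
    have hA := hgA j (by omega)
    have hB := hgB j (by omega)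
    rw [List.getD_eq_getElem?_getD, List.getElem?_eq_getElem hj1] at hA
    rw [List.getD_eq_getElem?_getD, List.getElem?_eq_getElem hj2] at hB
    simp at hA hB
    rw [hA, hB]
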